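-- pv_equiv track=rewrite | github.com/Patricia008/Google-HashCode | HashcodeTrial/pizza.py | checkSlice
-- ===== SOURCE A (Python) =====
-- def checkSlice(rows, r1i, c1i, r2i, c2i, minRequirement, maxNrcells, markedSlices):
-- 	tCount, mCount = 0, 0
-- 	nrOfIngredientsMet = False
-- 	nrOfCells = 0
-- 	for i1 in range(r1i, r2i+1):
-- 		for j1 in range(c1i, c2i+1):
-- 				if(rows[i1][j1] == 'T'):
-- 					tCount += 1
-- 				elif(rows[i1][j1] == 'M'):
-- 					mCount += 1
-- 				if(markedSlices[i1][j1] == 1):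
-- 					return False, False
-- 				nrOfCells+=1
-- 				if((tCount >= minRequirement) & (mCount >= minRequirement)):
-- 					nrOfIngredientsMet = True
-- 				if(nrOfCells > maxNrcells):
-- 					return False, True
-- 	return nrOfIngredientsMet, False
-- ===== SOURCE B (Python) =====
-- def checkSlice(rows, r1i, c1i, r2i, c2i, minRequirement, maxNrcells, markedSlices):
--     cells = [(i, j) for i in range(r1i, r2i + 1) for j in range(c1i, c2i + 1)]
--     nrOfCells = 0
--     for (i, j) in cells:
--         if markedSlices[i][j] == 1:
--             return False, False
--         nrOfCells += 1
--         if nrOfCells > maxNrcells: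
--             return False, True
--     tCount = sum(1 for (i, j) in cells if rows[i][j] == 'T')
--     mCount = sum(1 for (i, j) in cells if rows[i][j] == 'M')
--     return (len(cells) > 0 and tCount >= minRequirement and mCount >= minRequirement), False
-- ===== Notes on version B (the rewrite author's own statement) =====
-- stated objective: alternative
-- what changed: A's single fused per-cell loop (ingredient counters, running flag, marked and size checks interleaved) is split into a marked/size constraint scan over the row-major cell list followed by a separate whole-rectangle ingredient count with one closed-form final check replacing the per-cell flag update.
import Mathlib
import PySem

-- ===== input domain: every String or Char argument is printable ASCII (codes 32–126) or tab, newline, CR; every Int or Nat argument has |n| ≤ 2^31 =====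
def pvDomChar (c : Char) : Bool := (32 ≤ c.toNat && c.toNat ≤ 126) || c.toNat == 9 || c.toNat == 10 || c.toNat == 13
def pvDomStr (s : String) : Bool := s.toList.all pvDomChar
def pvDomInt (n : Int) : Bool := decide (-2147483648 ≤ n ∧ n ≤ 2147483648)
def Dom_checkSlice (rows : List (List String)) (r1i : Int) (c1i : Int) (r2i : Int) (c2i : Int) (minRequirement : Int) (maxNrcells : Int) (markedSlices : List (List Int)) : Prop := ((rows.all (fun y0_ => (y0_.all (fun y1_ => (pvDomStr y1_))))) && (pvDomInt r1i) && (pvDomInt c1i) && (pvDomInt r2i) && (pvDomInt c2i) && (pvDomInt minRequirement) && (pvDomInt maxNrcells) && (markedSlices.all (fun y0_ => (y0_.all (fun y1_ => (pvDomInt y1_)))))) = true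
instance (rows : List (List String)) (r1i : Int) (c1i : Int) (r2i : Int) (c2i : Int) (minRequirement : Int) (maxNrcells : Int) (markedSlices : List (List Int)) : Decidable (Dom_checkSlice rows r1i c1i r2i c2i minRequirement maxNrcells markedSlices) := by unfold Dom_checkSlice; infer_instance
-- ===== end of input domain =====

-- B splits A's fused scan into a marked/size constraint scan over the cell list plus a separate
-- ingredient count over the whole rectangle with one closed-form final check (objective: alternative).

-- shared cell accessors (Python's grid[i][j] with negative-index wraparound; the default is only
-- reached outside Pre_, where Python raises IndexError)
def pvCellAt (rows : List (List String)) (i j : Int) : String :=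
  ((PySem.List.pyGet? rows i).bind (fun r => PySem.List.pyGet? r j)).getD ""
def pvMarkAt (ms : List (List Int)) (i j : Int) : Int :=
  ((PySem.List.pyGet? ms i).bind (fun r => PySem.List.pyGet? r j)).getD 0

-- ===== PORT A =====
-- state: (tCount, mCount, nrOfIngredientsMet, nrOfCells)
def pvAInner (rows : List (List String)) (ms : List (List Int)) (minR maxN : Int) (i : Int) :
    List Int → (Int × Int × Bool × Int) → Sum (Bool × Bool) (Int × Int × Bool × Int)
  | [], st => Sum.inr st
  | j :: rest, (t, m, flag, n) =>
    let t' := if pvCellAt rows i j = "T" then t + 1 else t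
    let m' := if pvCellAt rows i j = "T" then m
              else if pvCellAt rows i j = "M" then m + 1 else m
    if pvMarkAt ms i j = 1 then Sum.inl (false, false)
    else
      let n' := n + 1
      let flag' := if t' ≥ minR ∧ m' ≥ minR then true else flag
      if n' > maxN then Sum.inl (false, true)
      else pvAInner rows ms minR maxN i rest (t', m', flag', n')

-- Python evaluates range(c1i, c2i+1) afresh on each outer iteration
def pvAOuter (rows : List (List String)) (ms : List (List Int)) (minR maxN : Int) (c1 c2 : Int) :
    List Int → (Int × Int × Bool × Int) → Bool × Bool
  | [], st => (st.2.2.1, false)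
  | i :: rest, st =>
    match pvAInner rows ms minR maxN i (PySem.List.pyRange c1 (c2 + 1) 1) st with
    | Sum.inl r => r
    | Sum.inr st' => pvAOuter rows ms minR maxN c1 c2 rest st'

def checkSlice (rows : List (List String)) (r1i : Int) (c1i : Int) (r2i : Int) (c2i : Int) (minRequirement : Int) (maxNrcells : Int) (markedSlices : List (List Int)) : Bool × Bool :=
  pvAOuter rows markedSlices minRequirement maxNrcells c1i c2i
    (PySem.List.pyRange r1i (r2i + 1) 1) (0, 0, false, 0)

-- ===== PORT B =====
def pvCells (r1 c1 r2 c2 : Int) : List (Int × Int) :=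
  (PySem.List.pyRange r1 (r2 + 1) 1).flatMap
    (fun i => (PySem.List.pyRange c1 (c2 + 1) 1).map (fun j => (i, j)))

-- pass 1: constraint scan (marked cell → (False,False); size overflow → (False,True))
def pvBScan (ms : List (List Int)) (maxN : Int) : List (Int × Int) → Int → Option (Bool × Bool)
  | [], _ => none
  | (i, j) :: rest, n =>
    if pvMarkAt ms i j = 1 then some (false, false)
    else if n + 1 > maxN then some (false, true)
    else pvBScan ms maxN rest (n + 1)

def checkSlice_alt (rows : List (List String)) (r1i : Int) (c1i : Int) (r2i : Int) (c2i : Int) (minRequirement : Int) (maxNrcells : Int) (markedSlices : List (List Int)) : Bool × Bool :=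
  let cells := pvCells r1i c1i r2i c2i
  match pvBScan markedSlices maxNrcells cells 0 with
  | some r => r
  | none =>
    -- pass 2: ingredient counts over the whole rectangle
    let tCount : Int := cells.countP (fun p => pvCellAt rows p.1 p.2 == "T")
    let mCount : Int := cells.countP (fun p => pvCellAt rows p.1 p.2 == "M")
    (decide (0 < cells.length) && decide (tCount ≥ minRequirement) && decide (mCount ≥ minRequirement), false)

-- ===== PRECONDITION & SPEC =====
-- Pre_ excludes exactly the inputs on which A raises IndexError (an invalid row/column index, in
-- rows or markedSlices, at a cell A actually reaches before any early return); every input on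
-- which A returns — including early returns on a marked cell or a size overflow — satisfies Pre_.
-- The validity scan walks the reached cells only (it stops at the first invalid, marked or
-- budget-exceeding cell), so it is decidable even for astronomically large index ranges; it
-- inspects only index validity and marked/size stops, never the ingredient counts or the result.

-- inl false = invalid index reached (A raises); inl true = A returns early before any further
-- cell; inr n = row finished, n cells seen so far
def pvPreCols (rows : List (List String)) (ms : List (List Int)) (maxN i : Int) :
    Nat → Int → Int → Sum Bool Int
  | 0, _, n => Sum.inr n
  | fuel + 1, j, n =>
    match (PySem.List.pyGet? rows i).bind (fun r => PySem.List.pyGet? r j),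
          (PySem.List.pyGet? ms i).bind (fun r => PySem.List.pyGet? r j) with
    | some _, some v =>
      if v = 1 then Sum.inl true
      else if n + 1 > maxN then Sum.inl true
      else pvPreCols rows ms maxN i fuel (j + 1) (n + 1)
    | _, _ => Sum.inl false

def pvPreRows (rows : List (List String)) (ms : List (List Int)) (maxN c1 c2 : Int) :
    Nat → Int → Int → Bool
  | 0, _, _ => true
  | fuel + 1, i, n =>
    match pvPreCols rows ms maxN i (c2 + 1 - c1).toNat c1 n with
    | Sum.inl b => b
    | Sum.inr n' => pvPreRows rows ms maxN c1 c2 fuel (i + 1) n'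

-- an empty column range makes every iteration a no-op (A indexes nothing, so it cannot raise):
-- short-circuit it so Pre_ is decidable even for astronomically many empty rows
def Pre_checkSlice (rows : List (List String)) (r1i : Int) (c1i : Int) (r2i : Int) (c2i : Int) (minRequirement : Int) (maxNrcells : Int) (markedSlices : List (List Int)) : Prop :=
  pvPreRows rows markedSlices maxNrcells c1i c2i
    (if (c2i + 1 - c1i).toNat = 0 then 0 else (r2i + 1 - r1i).toNat) r1i 0 = true
instance (rows : List (List String)) (r1i : Int) (c1i : Int) (r2i : Int) (c2i : Int) (minRequirement : Int) (maxNrcells : Int) (markedSlices : List (List Int)) : Decidable (Pre_checkSlice rows r1i c1i r2i c2i minRequirement maxNrcells markedSlices) := by unfold Pre_checkSlice; infer_instance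

def pvWitness_checkSlice : List (List String) × Int × Int × Int × Int × Int × Int × List (List Int) :=
  ([["T", "M"]], 0, 0, 0, 1, 1, 5, [[0, 0]])

def Spec_checkSlice (rows : List (List String)) (r1i : Int) (c1i : Int) (r2i : Int) (c2i : Int) (minRequirement : Int) (maxNrcells : Int) (markedSlices : List (List Int)) (out : Bool × Bool) : Prop := out = checkSlice_alt rows r1i c1i r2i c2i minRequirement maxNrcells markedSlices
instance (rows : List (List String)) (r1i : Int) (c1i : Int) (r2i : Int) (c2i : Int) (minRequirement : Int) (maxNrcells : Int) (markedSlices : List (List Int)) (out : Bool × Bool) : Decidable (Spec_checkSlice rows r1i c1i r2i c2i minRequirement maxNrcells markedSlices out) := by unfold Spec_checkSlice; infer_instance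

-- ===== CLAIM (what is proved, stated in full; the proofs are below) =====
def Claim_equal_checkSlice : Prop := ∀ (rows : List (List String)) (r1i : Int) (c1i : Int) (r2i : Int) (c2i : Int) (minRequirement : Int) (maxNrcells : Int) (markedSlices : List (List Int)), Dom_checkSlice rows r1i c1i r2i c2i minRequirement maxNrcells markedSlices → Pre_checkSlice rows r1i c1i r2i c2i minRequirement maxNrcells markedSlices → Spec_checkSlice rows r1i c1i r2i c2i minRequirement maxNrcells markedSlices (checkSlice rows r1i c1i r2i c2i minRequirement maxNrcells markedSlices)

-- ===== LEMMAS AND PROOFS =====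

-- A's loop flattened over the row-major cell list (proof-only helper)
def pvAFlat (rows : List (List String)) (ms : List (List Int)) (minR maxN : Int) :
    List (Int × Int) → (Int × Int × Bool × Int) → Bool × Bool
  | [], st => (st.2.2.1, false)
  | (i, j) :: rest, (t, m, flag, n) =>
    let t' := if pvCellAt rows i j = "T" then t + 1 else t
    let m' := if pvCellAt rows i j = "T" then m
              else if pvCellAt rows i j = "M" then m + 1 else m
    if pvMarkAt ms i j = 1 then (false, false)
    else
      let n' := n + 1
      let flag' := if t' ≥ minR ∧ m' ≥ minR then true else flag
      if n' > maxN then (false, true)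
      else pvAFlat rows ms minR maxN rest (t', m', flag', n')

lemma pvAInner_flat (rows : List (List String)) (ms : List (List Int)) (minR maxN : Int) (i : Int)
    (cols : List Int) (st : Int × Int × Bool × Int) (tail : List (Int × Int)) :
    pvAFlat rows ms minR maxN (cols.map (fun j => (i, j)) ++ tail) st =
      match pvAInner rows ms minR maxN i cols st with
      | Sum.inl r => r
      | Sum.inr st' => pvAFlat rows ms minR maxN tail st' := by
  induction cols generalizing st with
  | nil => simp [pvAInner]
  | cons j rest ih =>
    obtain ⟨t, m, flag, n⟩ := st
    simp only [List.map_cons, List.cons_append, pvAFlat, pvAInner]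
    split_ifs <;> first | rfl | exact ih _

lemma pvAOuter_flat (rows : List (List String)) (ms : List (List Int)) (minR maxN : Int)
    (c1 c2 : Int) (rs : List Int) (st : Int × Int × Bool × Int) :
    pvAOuter rows ms minR maxN c1 c2 rs st =
      pvAFlat rows ms minR maxN
        (rs.flatMap (fun i => (PySem.List.pyRange c1 (c2 + 1) 1).map (fun j => (i, j)))) st := by
  induction rs generalizing st with
  | nil => cases st; simp [pvAOuter, pvAFlat]
  | cons i rest ih =>
    simp only [pvAOuter, List.flatMap_cons, pvAInner_flat]
    cases pvAInner rows ms minR maxN i (PySem.List.pyRange c1 (c2 + 1) 1) st with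
    | inl r => simp
    | inr st' => simp [ih]

lemma pvAbsorb (minR p q x y : Int) (hx : p ≤ x) (hy : q ≤ y) (e : Bool)
    (h0 : e = false → p = x ∧ q = y) :
    (((if p ≥ minR ∧ q ≥ minR then true else false) : Bool) || e && decide (x ≥ minR) && decide (y ≥ minR))
      = (decide (x ≥ minR) && decide (y ≥ minR)) := by
  cases e with
  | false =>
    obtain ⟨rfl, rfl⟩ := h0 rfl
    by_cases h1 : p ≥ minR <;> by_cases h2 : q ≥ minR <;> simp [h1, h2]
  | true =>
    by_cases h1 : p ≥ minR <;> by_cases h2 : q ≥ minR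
    · simp [h1, h2, le_trans h1 hx, le_trans h2 hy]
    · simp [h1, h2]
    · simp [h1, h2]
    · simp [h1, h2]

-- main invariant: A's flattened loop vs B's scan + counts
lemma pvAFlat_eq_scan (rows : List (List String)) (ms : List (List Int)) (minR maxN : Int)
    (cells : List (Int × Int)) (t m : Int) (flag : Bool) (n : Int) :
    pvAFlat rows ms minR maxN cells (t, m, flag, n) =
      match pvBScan ms maxN cells n with
      | some r => r
      | none =>
        ((flag || (!cells.isEmpty &&
            decide (t + (cells.countP (fun p => pvCellAt rows p.1 p.2 == "T") : Int) ≥ minR) &&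
            decide (m + (cells.countP (fun p => pvCellAt rows p.1 p.2 == "M") : Int) ≥ minR))), false) := by
  induction cells generalizing t m flag n with
  | nil => simp [pvAFlat, pvBScan]
  | cons hd rest ih =>
    obtain ⟨i, j⟩ := hd
    by_cases h1 : pvMarkAt ms i j = 1
    · simp [pvAFlat, pvBScan, h1]
    · by_cases h2 : n + 1 > maxN
      · simp [pvAFlat, pvBScan, h1, h2]
      · have hstep : pvAFlat rows ms minR maxN ((i, j) :: rest) (t, m, flag, n) =
            pvAFlat rows ms minR maxN rest
              (if pvCellAt rows i j = "T" then t + 1 else t,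
               if pvCellAt rows i j = "T" then m
                 else if pvCellAt rows i j = "M" then m + 1 else m,
               if (if pvCellAt rows i j = "T" then t + 1 else t) ≥ minR ∧
                  (if pvCellAt rows i j = "T" then m
                    else if pvCellAt rows i j = "M" then m + 1 else m) ≥ minR then true else flag,
               n + 1) := by
          simp [pvAFlat, h1, h2]
        have hscan0 : pvBScan ms maxN ((i, j) :: rest) n = pvBScan ms maxN rest (n + 1) := by
          simp [pvBScan, h1, h2]
        rw [hstep, ih, hscan0]
        cases hscan : pvBScan ms maxN rest (n + 1) with
        | some r => rfl
        | none =>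
          simp only [Prod.mk.injEq, and_true]
          have hcT : t + ((((i, j) :: rest).countP (fun p => pvCellAt rows p.1 p.2 == "T") : Int))
              = (if pvCellAt rows i j = "T" then t + 1 else t)
                + (rest.countP (fun p => pvCellAt rows p.1 p.2 == "T") : Int) := by
            by_cases hT : pvCellAt rows i j = "T" <;> simp [hT] <;> omega
          have hcM : m + ((((i, j) :: rest).countP (fun p => pvCellAt rows p.1 p.2 == "M") : Int))
              = (if pvCellAt rows i j = "T" then m
                  else if pvCellAt rows i j = "M" then m + 1 else m)
                + (rest.countP (fun p => pvCellAt rows p.1 p.2 == "M") : Int) := by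
            by_cases hT : pvCellAt rows i j = "T" <;> by_cases hM : pvCellAt rows i j = "M"
            · exfalso; rw [hT] at hM; exact absurd hM (by decide)
            all_goals (simp [hT, hM] <;> omega)
          rw [hcT, hcM]
          simp only [List.isEmpty_cons, Bool.not_false, Bool.true_and]
          cases flag with
          | true => simp
          | false =>
            refine pvAbsorb minR _ _ _ _ ?_ ?_ _ ?_
            · exact le_add_of_nonneg_right (by positivity)
            · exact le_add_of_nonneg_right (by positivity)
            · intro h
              cases rest with
              | nil => simp
              | cons q qs => simp at h

theorem checkSlice_spec : Claim_equal_checkSlice := by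
  intro rows r1i c1i r2i c2i minRequirement maxNrcells markedSlices _ _
  unfold Spec_checkSlice checkSlice checkSlice_alt
  rw [pvAOuter_flat]
  rw [show (PySem.List.pyRange r1i (r2i + 1) 1).flatMap
        (fun i => (PySem.List.pyRange c1i (c2i + 1) 1).map (fun j => (i, j))) =
      pvCells r1i c1i r2i c2i from rfl]
  rw [pvAFlat_eq_scan]
  cases hscan : pvBScan markedSlices maxNrcells (pvCells r1i c1i r2i c2i) 0 with
  | some r => simp [hscan]
  | none =>
    simp only [hscan, Prod.mk.injEq, and_true, Bool.false_or, zero_add]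
    cases hc : (pvCells r1i c1i r2i c2i).isEmpty <;>
      simp_all [List.isEmpty_iff, List.length_pos_iff]
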